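-- pv_equiv track=rewrite | github.com/thiagoplancke/miniprojeto_lgpd | LGPD.py | anonimizar_cpf
-- ===== SOURCE A (Python) =====
-- def anonimizar_cpf(cpf):
--     cpf_ = ""
--     for indice, j in enumerate(cpf):
--         if indice >= 4 and indice <= 6:
--             j = "*"
--         if indice >= 8 and indice <= 10:
--             j = "*"
--         if indice >= 12 and indice <= 13:
--             j = "*"
--         cpf_= cpf_ + j
--
--
--
--     return cpf_
-- ===== SOURCE B (Python) =====
-- def anonimizar_cpf(cpf):
--     return (cpf[:4]
--             + "*" * len(cpf[4:7])
--             + cpf[7:8]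
--             + "*" * len(cpf[8:11])
--             + cpf[11:12]
--             + "*" * len(cpf[12:14])
--             + cpf[14:])
-- ===== Notes on version B (the rewrite author's own statement) =====
-- stated objective: simpler
-- what changed: Replaced the per-character enumerate loop with index-range branch tests by a single expression that slices the string into fixed blocks and joins kept slices with star runs sized by the masked slices' lengths.
import Mathlib
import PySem

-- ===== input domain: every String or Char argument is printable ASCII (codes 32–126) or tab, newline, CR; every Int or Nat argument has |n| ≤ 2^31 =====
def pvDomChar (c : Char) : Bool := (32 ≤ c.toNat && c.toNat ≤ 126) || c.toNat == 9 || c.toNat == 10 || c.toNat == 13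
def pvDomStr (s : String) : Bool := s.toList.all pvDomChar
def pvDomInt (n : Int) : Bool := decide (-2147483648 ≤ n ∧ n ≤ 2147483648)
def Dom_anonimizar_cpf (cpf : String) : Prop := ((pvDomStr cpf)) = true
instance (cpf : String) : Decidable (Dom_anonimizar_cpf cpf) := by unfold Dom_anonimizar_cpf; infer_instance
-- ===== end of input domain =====

-- B replaces the per-character loop with index-range tests by fixed slice blocks joined
-- with star runs sized from the masked slices (objective: simpler).

-- ===== PORT A =====
-- per-character body of A's loop: the three `if` reassignments of j, in order
def maskA (p : Int × Char) : Char :=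
  let j := p.2
  let j := if 4 ≤ p.1 ∧ p.1 ≤ 6 then '*' else j
  let j := if 8 ≤ p.1 ∧ p.1 ≤ 10 then '*' else j
  let j := if 12 ≤ p.1 ∧ p.1 ≤ 13 then '*' else j
  j

def anonimizar_cpf (cpf : String) : String :=
  String.ofList ((PySem.List.enumerate cpf.toList 0).foldl (fun acc p => acc ++ [maskA p]) [])

-- ===== PORT B =====
def anonimizar_cpf_alt (cpf : String) : String :=
  let l := cpf.toList
  String.ofList (PySem.List.slice l none (some 4)
    ++ List.replicate (PySem.List.slice l (some 4) (some 7)).length '*'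
    ++ PySem.List.slice l (some 7) (some 8)
    ++ List.replicate (PySem.List.slice l (some 8) (some 11)).length '*'
    ++ PySem.List.slice l (some 11) (some 12)
    ++ List.replicate (PySem.List.slice l (some 12) (some 14)).length '*'
    ++ PySem.List.slice l (some 14) none)

-- ===== PRECONDITION & SPEC =====
def Spec_anonimizar_cpf (cpf : String) (out : String) : Prop := out = anonimizar_cpf_alt cpf
instance (cpf : String) (out : String) : Decidable (Spec_anonimizar_cpf cpf out) := by unfold Spec_anonimizar_cpf; infer_instance

-- ===== CLAIM (what is proved, stated in full; the proofs are below) =====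
def Claim_equal_anonimizar_cpf : Prop := ∀ (cpf : String), Dom_anonimizar_cpf cpf → Spec_anonimizar_cpf cpf (anonimizar_cpf cpf)

-- ===== LEMMAS AND PROOFS =====
-- beyond index 13, A's loop copies every character unchanged
theorem tail_id : ∀ (l : List Char) (s : Int), 14 ≤ s →
    (PySem.List.enumerate l s).map maskA = l := by
  intro l
  induction l with
  | nil => intro s _; rfl
  | cons c t ih =>
    intro s hs
    have h1 : ¬(4 ≤ s ∧ s ≤ 6) := by omega
    have h2 : ¬(8 ≤ s ∧ s ≤ 10) := by omega
    have h3 : ¬(12 ≤ s ∧ s ≤ 13) := by omega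
    rw [PySem.List.enumerate_cons, List.map_cons, ih (s + 1) (by omega)]
    simp [maskA, h1, h2, h3]

-- the masked map equals B's slice decomposition, by cases on the first 14 characters
theorem mask_eq_slices : ∀ (l : List Char),
    (PySem.List.enumerate l 0).map maskA = PySem.List.slice l none (some 4)
    ++ List.replicate (PySem.List.slice l (some 4) (some 7)).length '*'
    ++ PySem.List.slice l (some 7) (some 8)
    ++ List.replicate (PySem.List.slice l (some 8) (some 11)).length '*'
    ++ PySem.List.slice l (some 11) (some 12)
    ++ List.replicate (PySem.List.slice l (some 12) (some 14)).length '*'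
    ++ PySem.List.slice l (some 14) none
  | [] => by
      norm_num [PySem.List.slice, PySem.List.clampIdx, show Int.toNat 4 = 4 from rfl, show Int.toNat 7 = 7 from rfl, show Int.toNat 8 = 8 from rfl, show Int.toNat 11 = 11 from rfl, show Int.toNat 12 = 12 from rfl, show Int.toNat 14 = 14 from rfl, maskA, PySem.List.enumerate_cons,
        PySem.List.enumerate_nil, List.replicate]
  | [a0] => by
      norm_num [PySem.List.slice, PySem.List.clampIdx, show Int.toNat 4 = 4 from rfl, show Int.toNat 7 = 7 from rfl, show Int.toNat 8 = 8 from rfl, show Int.toNat 11 = 11 from rfl, show Int.toNat 12 = 12 from rfl, show Int.toNat 14 = 14 from rfl, maskA, PySem.List.enumerate_cons,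
        PySem.List.enumerate_nil, List.replicate]
  | [a0, a1] => by
      norm_num [PySem.List.slice, PySem.List.clampIdx, show Int.toNat 4 = 4 from rfl, show Int.toNat 7 = 7 from rfl, show Int.toNat 8 = 8 from rfl, show Int.toNat 11 = 11 from rfl, show Int.toNat 12 = 12 from rfl, show Int.toNat 14 = 14 from rfl, maskA, PySem.List.enumerate_cons,
        PySem.List.enumerate_nil, List.replicate]
  | [a0, a1, a2] => by
      norm_num [PySem.List.slice, PySem.List.clampIdx, show Int.toNat 4 = 4 from rfl, show Int.toNat 7 = 7 from rfl, show Int.toNat 8 = 8 from rfl, show Int.toNat 11 = 11 from rfl, show Int.toNat 12 = 12 from rfl, show Int.toNat 14 = 14 from rfl, maskA, PySem.List.enumerate_cons,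
        PySem.List.enumerate_nil, List.replicate]
  | [a0, a1, a2, a3] => by
      norm_num [PySem.List.slice, PySem.List.clampIdx, show Int.toNat 4 = 4 from rfl, show Int.toNat 7 = 7 from rfl, show Int.toNat 8 = 8 from rfl, show Int.toNat 11 = 11 from rfl, show Int.toNat 12 = 12 from rfl, show Int.toNat 14 = 14 from rfl, maskA, PySem.List.enumerate_cons,
        PySem.List.enumerate_nil, List.replicate]
  | [a0, a1, a2, a3, a4] => by
      norm_num [PySem.List.slice, PySem.List.clampIdx, show Int.toNat 4 = 4 from rfl, show Int.toNat 7 = 7 from rfl, show Int.toNat 8 = 8 from rfl, show Int.toNat 11 = 11 from rfl, show Int.toNat 12 = 12 from rfl, show Int.toNat 14 = 14 from rfl, maskA, PySem.List.enumerate_cons,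
        PySem.List.enumerate_nil, List.replicate]
  | [a0, a1, a2, a3, a4, a5] => by
      norm_num [PySem.List.slice, PySem.List.clampIdx, show Int.toNat 4 = 4 from rfl, show Int.toNat 7 = 7 from rfl, show Int.toNat 8 = 8 from rfl, show Int.toNat 11 = 11 from rfl, show Int.toNat 12 = 12 from rfl, show Int.toNat 14 = 14 from rfl, maskA, PySem.List.enumerate_cons,
        PySem.List.enumerate_nil, List.replicate]
  | [a0, a1, a2, a3, a4, a5, a6] => by
      norm_num [PySem.List.slice, PySem.List.clampIdx, show Int.toNat 4 = 4 from rfl, show Int.toNat 7 = 7 from rfl, show Int.toNat 8 = 8 from rfl, show Int.toNat 11 = 11 from rfl, show Int.toNat 12 = 12 from rfl, show Int.toNat 14 = 14 from rfl, maskA, PySem.List.enumerate_cons,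
        PySem.List.enumerate_nil, List.replicate]
  | [a0, a1, a2, a3, a4, a5, a6, a7] => by
      norm_num [PySem.List.slice, PySem.List.clampIdx, show Int.toNat 4 = 4 from rfl, show Int.toNat 7 = 7 from rfl, show Int.toNat 8 = 8 from rfl, show Int.toNat 11 = 11 from rfl, show Int.toNat 12 = 12 from rfl, show Int.toNat 14 = 14 from rfl, maskA, PySem.List.enumerate_cons,
        PySem.List.enumerate_nil, List.replicate]
  | [a0, a1, a2, a3, a4, a5, a6, a7, a8] => by
      norm_num [PySem.List.slice, PySem.List.clampIdx, show Int.toNat 4 = 4 from rfl, show Int.toNat 7 = 7 from rfl, show Int.toNat 8 = 8 from rfl, show Int.toNat 11 = 11 from rfl, show Int.toNat 12 = 12 from rfl, show Int.toNat 14 = 14 from rfl, maskA, PySem.List.enumerate_cons,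
        PySem.List.enumerate_nil, List.replicate]
  | [a0, a1, a2, a3, a4, a5, a6, a7, a8, a9] => by
      norm_num [PySem.List.slice, PySem.List.clampIdx, show Int.toNat 4 = 4 from rfl, show Int.toNat 7 = 7 from rfl, show Int.toNat 8 = 8 from rfl, show Int.toNat 11 = 11 from rfl, show Int.toNat 12 = 12 from rfl, show Int.toNat 14 = 14 from rfl, maskA, PySem.List.enumerate_cons,
        PySem.List.enumerate_nil, List.replicate]
  | [a0, a1, a2, a3, a4, a5, a6, a7, a8, a9, a10] => by
      norm_num [PySem.List.slice, PySem.List.clampIdx, show Int.toNat 4 = 4 from rfl, show Int.toNat 7 = 7 from rfl, show Int.toNat 8 = 8 from rfl, show Int.toNat 11 = 11 from rfl, show Int.toNat 12 = 12 from rfl, show Int.toNat 14 = 14 from rfl, maskA, PySem.List.enumerate_cons,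
        PySem.List.enumerate_nil, List.replicate]
  | [a0, a1, a2, a3, a4, a5, a6, a7, a8, a9, a10, a11] => by
      norm_num [PySem.List.slice, PySem.List.clampIdx, show Int.toNat 4 = 4 from rfl, show Int.toNat 7 = 7 from rfl, show Int.toNat 8 = 8 from rfl, show Int.toNat 11 = 11 from rfl, show Int.toNat 12 = 12 from rfl, show Int.toNat 14 = 14 from rfl, maskA, PySem.List.enumerate_cons,
        PySem.List.enumerate_nil, List.replicate]
  | [a0, a1, a2, a3, a4, a5, a6, a7, a8, a9, a10, a11, a12] => by
      norm_num [PySem.List.slice, PySem.List.clampIdx, show Int.toNat 4 = 4 from rfl, show Int.toNat 7 = 7 from rfl, show Int.toNat 8 = 8 from rfl, show Int.toNat 11 = 11 from rfl, show Int.toNat 12 = 12 from rfl, show Int.toNat 14 = 14 from rfl, maskA, PySem.List.enumerate_cons,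
        PySem.List.enumerate_nil, List.replicate]
  | a0::a1::a2::a3::a4::a5::a6::a7::a8::a9::a10::a11::a12::a13::t => by
      have m4 : min (Int.toNat 4) (t.length + 1 + 1 + 1 + 1 + 1 + 1 + 1 + 1 + 1 + 1 + 1 + 1 + 1 + 1) = 4 := by omega
      have m7 : min (Int.toNat 7) (t.length + 1 + 1 + 1 + 1 + 1 + 1 + 1 + 1 + 1 + 1 + 1 + 1 + 1 + 1) = 7 := by omega
      have m8 : min (Int.toNat 8) (t.length + 1 + 1 + 1 + 1 + 1 + 1 + 1 + 1 + 1 + 1 + 1 + 1 + 1 + 1) = 8 := by omega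
      have m11 : min (Int.toNat 11) (t.length + 1 + 1 + 1 + 1 + 1 + 1 + 1 + 1 + 1 + 1 + 1 + 1 + 1 + 1) = 11 := by omega
      have m12 : min (Int.toNat 12) (t.length + 1 + 1 + 1 + 1 + 1 + 1 + 1 + 1 + 1 + 1 + 1 + 1 + 1 + 1) = 12 := by omega
      have m14 : min (Int.toNat 14) (t.length + 1 + 1 + 1 + 1 + 1 + 1 + 1 + 1 + 1 + 1 + 1 + 1 + 1 + 1) = 14 := by omega
      norm_num [PySem.List.slice, PySem.List.clampIdx, show Int.toNat 4 = 4 from rfl, show Int.toNat 7 = 7 from rfl, show Int.toNat 8 = 8 from rfl, show Int.toNat 11 = 11 from rfl, show Int.toNat 12 = 12 from rfl, show Int.toNat 14 = 14 from rfl, maskA, PySem.List.enumerate_cons,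
        List.replicate, tail_id t 14 (by omega), m4, m7, m8, m11, m12, m14]
      omega

theorem anonimizar_cpf_spec : Claim_equal_anonimizar_cpf := by
  intro cpf _
  unfold Spec_anonimizar_cpf anonimizar_cpf anonimizar_cpf_alt
  rw [PySem.List.foldl_append_singleton_eq_map, List.nil_append, mask_eq_slices]
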